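-- pv_equiv track=rewrite | github.com/macko99/acn22-labs | lab2/reproduce_9.py | prepare_data_for_plotting
-- ===== SOURCE A (Python) =====
-- import operator
--
-- def prepare_data_for_plotting(array):
--     sorted_array = sorted(array.items(), key=operator.itemgetter(1))
--     result_set = [[0], [0]]
--     last_rank = 0
--     last_value = 0
--     result_set[0].append(last_rank)
--     result_set[1].append(last_value)
--     for item in sorted_array:
--         # for each link we increase the rank
--         last_rank += 1
--         # if there is change in number of paths link is on we store new values to teh result set
--         if last_value != item[1]:
--             result_set[0].append(last_rank)
--             result_set[1].append(last_value)
--             last_value = item[1]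
--     return result_set
-- ===== SOURCE B (Python) =====
-- import operator
--
-- def prepare_data_for_plotting(array):
--     # Run-based pass: walk distinct value-runs of the sorted values instead of every element.
--     values = [v for _, v in sorted(array.items(), key=operator.itemgetter(1))]
--     xs = [0, 0]
--     ys = [0, 0]
--     cum = 0
--     prev = 0
--     i = 0
--     n = len(values)
--     while i < n:
--         v = values[i]
--         j = i + 1
--         while j < n and values[j] == v:
--             j += 1
--         if prev != v:
--             xs.append(cum + 1)
--             ys.append(prev)
--             prev = v
--         cum += j - i
--         i = j
--     return [xs, ys]
-- ===== Notes on version B (the rewrite author's own statement) =====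
-- stated objective: alternative
-- what changed: B replaces A's per-element loop (rank counter incremented for every item, change test on each) by a run-based pass: it extracts the sorted values and consumes each maximal run of equal values at once, emitting one step point per distinct run.
import Mathlib
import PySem

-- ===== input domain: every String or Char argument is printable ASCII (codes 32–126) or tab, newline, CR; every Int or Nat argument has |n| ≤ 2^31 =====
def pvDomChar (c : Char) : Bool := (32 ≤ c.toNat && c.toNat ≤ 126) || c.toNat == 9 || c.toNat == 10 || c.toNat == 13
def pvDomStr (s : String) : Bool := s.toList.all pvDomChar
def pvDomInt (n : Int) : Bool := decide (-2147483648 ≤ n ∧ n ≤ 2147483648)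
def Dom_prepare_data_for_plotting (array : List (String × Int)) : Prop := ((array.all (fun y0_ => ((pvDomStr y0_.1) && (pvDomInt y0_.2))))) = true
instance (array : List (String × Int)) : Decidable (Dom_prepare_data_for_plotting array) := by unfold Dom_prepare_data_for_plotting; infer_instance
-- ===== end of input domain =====

-- B replaces A's per-element step loop by a run-based pass over the sorted values (alternative decomposition, same cost).


-- ===== PORT A =====
-- state = (result_set[0], result_set[1], last_rank, last_value)
def pvAStep (s : List Int × List Int × Int × Int) (item : String × Int) :
    List Int × List Int × Int × Int :=
  let r := s.2.2.1 + 1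
  if s.2.2.2 ≠ item.2 then (s.1 ++ [r], s.2.1 ++ [s.2.2.2], r, item.2)
  else (s.1, s.2.1, r, s.2.2.2)

def prepare_data_for_plotting (array : List (String × Int)) : List (List Int) :=
  let sorted_array := PySem.List.sorted array (fun p => p.2)
  let s := sorted_array.foldl pvAStep ([0, 0], [0, 0], 0, 0)
  [s.1, s.2.1]

-- ===== PORT B =====
-- run-based loop: consume the whole leading run of equal values at once
def pvBLoop (xs ys : List Int) (cum prev : Int) : List Int → List (List Int)
  | [] => [xs, ys]
  | v :: rest =>
    let t := rest.takeWhile (fun x => x == v)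
    let d := rest.dropWhile (fun x => x == v)
    if prev ≠ v then
      pvBLoop (xs ++ [cum + 1]) (ys ++ [prev]) (cum + (t.length + 1)) v d
    else
      pvBLoop xs ys (cum + (t.length + 1)) prev d
  termination_by l => l.length
  decreasing_by
    all_goals simpa using Nat.lt_succ_of_le (List.length_dropWhile_le (fun x => x == v) rest)

def prepare_data_for_plotting_alt (array : List (String × Int)) : List (List Int) :=
  let values := (PySem.List.sorted array (fun p => p.2)).map Prod.snd
  pvBLoop [0, 0] [0, 0] 0 0 values

-- ===== PRECONDITION & SPEC =====
def Spec_prepare_data_for_plotting (array : List (String × Int)) (out : List (List Int)) : Prop := out = prepare_data_for_plotting_alt array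
instance (array : List (String × Int)) (out : List (List Int)) : Decidable (Spec_prepare_data_for_plotting array out) := by unfold Spec_prepare_data_for_plotting; infer_instance

-- ===== CLAIM (what is proved, stated in full; the proofs are below) =====
def Claim_equal_prepare_data_for_plotting : Prop := ∀ (array : List (String × Int)), Dom_prepare_data_for_plotting array → Spec_prepare_data_for_plotting array (prepare_data_for_plotting array)

-- ===== LEMMAS AND PROOFS =====

-- A's value-only step (what pvAStep does to the value component of an item)
def pvVStep (s : List Int × List Int × Int × Int) (v : Int) :
    List Int × List Int × Int × Int :=
  let r := s.2.2.1 + 1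
  if s.2.2.2 ≠ v then (s.1 ++ [r], s.2.1 ++ [s.2.2.2], r, v)
  else (s.1, s.2.1, r, s.2.2.2)

-- folding A's step over a constant run only advances the rank
lemma pvVStep_run (t : List Int) (c : Int) (h : ∀ x ∈ t, x = c) (xs ys : List Int) (r : Int) :
    t.foldl pvVStep (xs, ys, r, c) = (xs, ys, r + t.length, c) := by
  induction t generalizing r with
  | nil => simp
  | cons a t ih =>
    have ha : a = c := h a (by simp)
    subst ha
    have : pvVStep (xs, ys, r, a) a = (xs, ys, r + 1, a) := by
      simp [pvVStep]
    rw [List.foldl_cons, this, ih (fun x hx => h x (by simp [hx]))]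
    simp only [List.length_cons, Prod.mk.injEq]
    refine ⟨trivial, trivial, by push_cast; ring, trivial⟩

-- main invariant: B's run loop computes A's element loop
lemma pvBLoop_eq_foldl (vs : List Int) (xs ys : List Int) (cum prev : Int) :
    pvBLoop xs ys cum prev vs =
      (let s := vs.foldl pvVStep (xs, ys, cum, prev); [s.1, s.2.1]) := by
  induction xs, ys, cum, prev, vs using pvBLoop.induct with
  | case1 xs ys cum prev => simp [pvBLoop]
  | case2 xs ys cum prev v rest t d hne ih =>
    have hsplit : v :: rest = (v :: rest.takeWhile (fun x => x == v)) ++ rest.dropWhile (fun x => x == v) := by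
      simp [List.takeWhile_append_dropWhile]
    rw [pvBLoop]
    rw [if_pos hne, ih]
    have hmem : ∀ x ∈ rest.takeWhile (fun x => x == v), x = v := fun x hx => by
      simpa using List.mem_takeWhile_imp hx
    have hstep : pvVStep (xs, ys, cum, prev) v = (xs ++ [cum + 1], ys ++ [prev], cum + 1, v) := by
      simp [pvVStep, hne]
    conv_rhs => rw [List.foldl_cons, hstep,
      ← List.takeWhile_append_dropWhile (p := fun x => x == v) (l := rest),
      List.foldl_append, pvVStep_run _ v hmem]
    have harith : cum + 1 + ((rest.takeWhile (fun x => x == v)).length : ℤ)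
        = cum + (((rest.takeWhile (fun x => x == v)).length : ℤ) + 1) := by ring
    rw [harith]
  | case3 xs ys cum prev v rest t d heq ih =>
    have hv : prev = v := by
      by_contra h; exact heq h
    subst hv
    rw [pvBLoop]
    simp only [ne_eq, not_true_eq_false, if_neg, not_false_eq_true]
    rw [ih]
    have hmem : ∀ x ∈ rest.takeWhile (fun x => x == prev), x = prev := fun x hx => by
      simpa using List.mem_takeWhile_imp hx
    have hstep : pvVStep (xs, ys, cum, prev) prev = (xs, ys, cum + 1, prev) := by
      simp [pvVStep]
    conv_rhs => rw [List.foldl_cons, hstep,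
      ← List.takeWhile_append_dropWhile (p := fun x => x == prev) (l := rest),
      List.foldl_append, pvVStep_run _ prev hmem]
    have harith : cum + 1 + ((rest.takeWhile (fun x => x == prev)).length : ℤ)
        = cum + (((rest.takeWhile (fun x => x == prev)).length : ℤ) + 1) := by ring
    rw [harith]

theorem prepare_data_for_plotting_spec : Claim_equal_prepare_data_for_plotting := by
  intro array _
  unfold Spec_prepare_data_for_plotting prepare_data_for_plotting prepare_data_for_plotting_alt
  simp only [pvBLoop_eq_foldl, List.foldl_map]
  rfl
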